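-- pv_equiv track=rewrite | github.com/jKaleba/WDI | Z6/Z6.py | ex5SequenceCut
-- ===== SOURCE A (Python) =====
-- from math import isqrt, log, sqrt
--
-- def prime(n: int):
--     if n < 2:
--         return False
--
--     if n == 2:
--         return True
--
--     if n % 2 == 0:
--         return False
--
--     for i in range(3, isqrt(n) + 1, 2):
--
--         if n % i == 0:
--             return False
--
--     return True
--
-- def ex5SequenceCut(sequence: list[int]):
--     if len(sequence) == 0:
--         return True
--
--     if len(sequence) == 1:
--         return False
--
--     power = 0
--     value = 0
--     i = len(sequence) - 1
--
--     while i >= 0: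
--
--         value += sequence[i] * (2 ** power)
--         if prime(value):
--
--             if ex5SequenceCut(sequence[0:i]):
--                 return True
--
--         power += 1
--         i -= 1
--
--     return False
-- ===== SOURCE B (Python) =====
-- from math import isqrt
--
-- def _is_prime(v):
--     if v < 2:
--         return False
--     if v == 2:
--         return True
--     if v % 2 == 0:
--         return False
--     return all(v % d != 0 for d in range(3, isqrt(v) + 1, 2))
--
-- def ex5SequenceCut(sequence: list[int]):
--     memo = {}
--
--     def cut(j):
--         # can the prefix sequence[:j] be cut into prime binary segments?
--         if j == 0:
--             return True
--         if j == 1: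
--             return False
--         if j in memo:
--             return memo[j]
--         res = False
--         value = 0
--         power = 0
--         for i in range(j - 1, -1, -1):
--             value += sequence[i] * 2 ** power
--             power += 1
--             if _is_prime(value) and cut(i):
--                 res = True
--                 break
--         memo[j] = res
--         return res
--
--     return cut(len(sequence))
-- ===== Notes on version B (the rewrite author's own statement) =====
-- stated objective: alternative
-- what changed: Replaces A's unmemoized recursion on list slices with a memoized recursion over prefix lengths (dict dp of prefix verdicts, index arithmetic instead of slicing), which caps the worst case at O(n^2) segment prime checks where A can revisit the same prefix exponentially often.
import Mathlib
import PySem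

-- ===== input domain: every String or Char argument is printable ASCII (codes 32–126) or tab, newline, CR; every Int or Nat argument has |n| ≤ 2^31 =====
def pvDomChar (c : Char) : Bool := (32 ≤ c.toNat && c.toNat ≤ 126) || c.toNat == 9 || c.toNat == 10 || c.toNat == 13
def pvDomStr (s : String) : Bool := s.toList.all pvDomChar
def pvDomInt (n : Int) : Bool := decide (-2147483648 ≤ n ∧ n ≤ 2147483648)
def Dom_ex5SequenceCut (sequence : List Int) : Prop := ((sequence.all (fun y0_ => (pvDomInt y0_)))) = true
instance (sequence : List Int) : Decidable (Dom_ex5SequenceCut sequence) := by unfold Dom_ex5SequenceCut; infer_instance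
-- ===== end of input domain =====

-- B replaces A's unmemoized recursion on list slices by a memoized recursion over
-- prefix lengths (same return value; A mutates nothing, so only the return value is at stake).

-- ===== PORT A =====
-- prime(n): trial division by odd numbers up to isqrt(n)
def pyPrime (n : Int) : Bool :=
  if n < 2 then false
  else if n = 2 then true
  else if PySem.Int.mod n 2 = 0 then false
  else if (PySem.List.pyRange 3 ((Nat.sqrt n.toNat : Int) + 1) 2).any
            (fun i => PySem.Int.mod n i == 0) then false
  else true

-- A's recursion, made total with a fuel parameter (fuel = length suffices; the
-- while-loop is ex5CutLoop, the recursive call acts on the slice sequence[0:i])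
mutual
def ex5Cut (fuel : Nat) (sequence : List Int) : Bool :=
  match fuel with
  | 0 => true
  | Nat.succ fuel' =>
    if sequence.length = 0 then true
    else if sequence.length = 1 then false
    else ex5CutLoop fuel' sequence 0 0 ((sequence.length : Int) - 1)
termination_by (fuel, 0)

def ex5CutLoop (fuel : Nat) (s : List Int) (power value i : Int) : Bool :=
  if h : 0 ≤ i then
    let value' := value + (PySem.List.pyGetD s i 0) * 2 ^ power.toNat
    if pyPrime value' && ex5Cut fuel (PySem.List.slice s (some 0) (some i)) then true
    else ex5CutLoop fuel s (power + 1) value' (i - 1)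
  else false
termination_by (fuel, (i + 1).toNat + 1)
decreasing_by
  · exact Prod.Lex.right _ (by omega)
  · exact Prod.Lex.right _ (by omega)
end

def ex5SequenceCut (sequence : List Int) : Bool :=
  ex5Cut sequence.length sequence

-- ===== PORT B =====
def altIsPrime (v : Int) : Bool :=
  if v < 2 then false
  else if v = 2 then true
  else if PySem.Int.mod v 2 = 0 then false
  else (PySem.List.pyRange 3 ((Nat.sqrt v.toNat : Int) + 1) 2).all
         (fun d => PySem.Int.mod v d != 0)

-- B's memoized recursion over prefix lengths (cut j = can sequence[:j] be cut);
-- the memo dict is threaded through, fuel = length suffices as on the A side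
mutual
def altCut (fuel : Nat) (s : List Int) (memo : PySem.Dict Int Bool) (j : Nat) :
    Bool × PySem.Dict Int Bool :=
  match fuel with
  | 0 => (true, memo)
  | Nat.succ f =>
    if j = 0 then (true, memo)
    else if j = 1 then (false, memo)
    else
      match PySem.Dict.get? memo (j : Int) with
      | some b => (b, memo)
      | none =>
        let r := altLoop f s memo 0 0 ((j : Int) - 1)
        (r.1, PySem.Dict.insert r.2 (j : Int) r.1)
termination_by (fuel, 0)

def altLoop (fuel : Nat) (s : List Int) (memo : PySem.Dict Int Bool)
    (power value i : Int) : Bool × PySem.Dict Int Bool :=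
  if h : 0 ≤ i then
    let value' := value + s.getD i.toNat 0 * 2 ^ power.toNat
    if altIsPrime value' then
      let r := altCut fuel s memo i.toNat
      if r.1 then (true, r.2)
      else altLoop fuel s r.2 (power + 1) value' (i - 1)
    else altLoop fuel s memo (power + 1) value' (i - 1)
  else (false, memo)
termination_by (fuel, (i + 1).toNat + 1)
decreasing_by
  · exact Prod.Lex.right _ (by omega)
  · exact Prod.Lex.right _ (by omega)
  · exact Prod.Lex.right _ (by omega)
end

def ex5SequenceCut_alt (sequence : List Int) : Bool :=
  (altCut sequence.length sequence PySem.Dict.empty sequence.length).1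

-- ===== PRECONDITION & SPEC =====
def Spec_ex5SequenceCut (sequence : List Int) (out : Bool) : Prop := out = ex5SequenceCut_alt sequence
instance (sequence : List Int) (out : Bool) : Decidable (Spec_ex5SequenceCut sequence out) := by unfold Spec_ex5SequenceCut; infer_instance

-- ===== CLAIM (what is proved, stated in full; the proofs are below) =====
def Claim_equal_ex5SequenceCut : Prop := ∀ (sequence : List Int), Dom_ex5SequenceCut sequence → Spec_ex5SequenceCut sequence (ex5SequenceCut sequence)



-- ===== LEMMAS AND PROOFS =====

lemma all_ne_eq_not_any_eq (l : List Int) (n : Int) :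
    (l.all fun d => PySem.Int.mod n d != 0) = !(l.any fun d => PySem.Int.mod n d == 0) := by
  induction l with
  | nil => rfl
  | cons a t ih =>
    simp only [List.all_cons, List.any_cons, Bool.not_or, bne] at ih ⊢
    rw [ih]

-- the two trial-division primality tests agree (any-divisor vs all-nondivisor)
lemma prime_eq (v : Int) : altIsPrime v = pyPrime v := by
  unfold altIsPrime pyPrime
  split_ifs with h1 h2 h3 h4 <;> try rfl
  · rw [all_ne_eq_not_any_eq, h4]
    rfl
  · rw [all_ne_eq_not_any_eq, Bool.eq_false_iff.mpr h4]
    rfl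

lemma cut_nil (fuel : Nat) : ex5Cut fuel [] = true := by
  cases fuel <;> simp [ex5Cut]

lemma loop_neg (f : Nat) (s : List Int) (p v i : Int) (h : i < 0) :
    ex5CutLoop f s p v i = false := by
  rw [ex5CutLoop, dif_neg (by omega)]

-- one unfolding of A's while-loop body at i = 0 resp. i = i'+1
lemma loop_unfold_zero (f : Nat) (s : List Int) (p v : Int) :
    ex5CutLoop f s p v (0 : Int) =
      (if pyPrime (v + s.getD 0 0 * 2 ^ p.toNat) && ex5Cut f (s.take 0)
       then true else false) := by
  rw [ex5CutLoop, dif_pos (by norm_num),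
    PySem.List.pyGetD_of_nonneg s 0 (by norm_num),
    PySem.List.slice_zero_start, PySem.List.slice_to s (by norm_num)]
  simp only [Int.toNat_zero, zero_sub]
  rw [loop_neg f s _ _ _ (by norm_num)]

lemma loop_unfold_succ (f : Nat) (s : List Int) (p v : Int) (i : Nat) :
    ex5CutLoop f s p v ((i + 1 : Nat) : Int) =
      (if pyPrime (v + s.getD (i + 1) 0 * 2 ^ p.toNat) && ex5Cut f (s.take (i + 1))
       then true
       else ex5CutLoop f s (p + 1) (v + s.getD (i + 1) 0 * 2 ^ p.toNat) (i : Int)) := by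
  rw [ex5CutLoop, dif_pos (by positivity),
    PySem.List.pyGetD_of_nonneg s 0 (by positivity),
    PySem.List.slice_zero_start, PySem.List.slice_to s (by positivity)]
  simp only [Int.toNat_natCast]
  rw [show ((i + 1 : Nat) : Int) - 1 = (i : Int) by push_cast; ring]

-- the fuel parameter is irrelevant once it reaches the list length
lemma cut_fuel : ∀ (n : Nat) (s : List Int) (fuel fuel' : Nat), s.length ≤ n →
    s.length ≤ fuel → s.length ≤ fuel' → ex5Cut fuel s = ex5Cut fuel' s := by
  intro n
  induction n with
  | zero =>
    intro s f f' hn _ _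
    have : s = [] := List.length_eq_zero_iff.mp (Nat.le_zero.mp hn)
    subst this; rw [cut_nil, cut_nil]
  | succ n ih =>
    intro s fuel fuel' hn hf hf'
    by_cases h0 : s.length = 0
    · have : s = [] := List.length_eq_zero_iff.mp h0
      subst this; rw [cut_nil, cut_nil]
    by_cases h1 : s.length = 1
    · obtain ⟨f, rfl⟩ : ∃ f, fuel = f + 1 := ⟨fuel - 1, by omega⟩
      obtain ⟨f', rfl⟩ : ∃ f', fuel' = f' + 1 := ⟨fuel' - 1, by omega⟩
      simp [ex5Cut, h1]
    · obtain ⟨f, rfl⟩ : ∃ f, fuel = f + 1 := ⟨fuel - 1, by omega⟩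
      obtain ⟨f', rfl⟩ : ∃ f', fuel' = f' + 1 := ⟨fuel' - 1, by omega⟩
      simp only [ex5Cut, h0, h1, if_false]
      have key : ∀ (i : Nat) (p v : Int), i < s.length → i ≤ f → i ≤ f' →
          ex5CutLoop f s p v (i : Int) = ex5CutLoop f' s p v (i : Int) := by
        intro i
        induction i with
        | zero =>
          intro p v _ _ _
          simp only [Nat.cast_zero]
          rw [loop_unfold_zero, loop_unfold_zero,
            ih (s.take 0) f f' (by simp) (by simp) (by simp)]
        | succ i' ihi =>
          intro p v hi hif hif'
          rw [loop_unfold_succ, loop_unfold_succ,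
            ih (s.take (i' + 1)) f f' (by simp; omega) (by simp; omega) (by simp; omega)]
          split
          · rfl
          · exact ihi (p + 1) _ (by omega) (by omega) (by omega)
      have := key (s.length - 1) 0 0 (by omega) (by omega) (by omega)
      rwa [show ((s.length - 1 : Nat) : Int) = (s.length : Int) - 1 by omega] at this

lemma cut_eq (s : List Int) (fuel : Nat) (h : s.length ≤ fuel) :
    ex5Cut fuel s = ex5SequenceCut s :=
  cut_fuel fuel s fuel s.length h h (le_refl _)

-- A's loop only reads indices and slices below i, so a long-enough prefix acts like s
lemma loop_take (s : List Int) (j f : Nat) :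
    ∀ (i : Nat) (p v : Int), i < j →
    ex5CutLoop f (s.take j) p v (i : Int) = ex5CutLoop f s p v (i : Int) := by
  intro i
  induction i with
  | zero =>
    intro p v hij
    simp only [Nat.cast_zero]
    rw [loop_unfold_zero, loop_unfold_zero]
    simp [List.getD, hij]
  | succ i' ihi =>
    intro p v hij
    rw [loop_unfold_succ, loop_unfold_succ]
    have hg : (s.take j).getD (i' + 1) 0 = s.getD (i' + 1) 0 := by
      simp [List.getD, hij]
    have ht : (s.take j).take (i' + 1) = s.take (i' + 1) := by
      rw [List.take_take]; congr 1; omega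
    rw [hg, ht]
    split
    · rfl
    · exact ihi (p + 1) _ (by omega)

-- fuel irrelevance, loop form (derived from cut_fuel)
lemma loop_fuel (s : List Int) (f f' : Nat) :
    ∀ (i : Nat) (p v : Int), i < s.length → i ≤ f → i ≤ f' →
    ex5CutLoop f s p v (i : Int) = ex5CutLoop f' s p v (i : Int) := by
  intro i
  induction i with
  | zero =>
    intro p v _ _ _
    simp only [Nat.cast_zero]
    rw [loop_unfold_zero, loop_unfold_zero,
      cut_fuel 0 (s.take 0) f f' (by simp) (by simp) (by simp)]
  | succ i' ihi =>
    intro p v hi hif hif'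
    rw [loop_unfold_succ, loop_unfold_succ,
      cut_fuel (i' + 1) (s.take (i' + 1)) f f' (by simp) (by simp; omega) (by simp; omega)]
    split
    · rfl
    · exact ihi (p + 1) _ (by omega) (by omega) (by omega)

-- A's loop started at j-1 computes A's verdict on the length-j prefix
lemma loopA_prefix (s : List Int) (j f : Nat) (hj2 : 2 ≤ j) (hjle : j ≤ s.length)
    (hf : j - 1 ≤ f) :
    ex5CutLoop f s 0 0 ((j - 1 : Nat) : Int) = ex5SequenceCut (s.take j) := by
  rw [loop_fuel s f (j - 1) (j - 1) 0 0 (by omega) hf (le_refl _),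
    ← loop_take s j (j - 1) (j - 1) 0 0 (by omega)]
  have hlen : (s.take j).length = j := by simp; omega
  rw [show ex5SequenceCut (s.take j) = ex5Cut (s.take j).length (s.take j) from rfl, hlen]
  obtain ⟨j', rfl⟩ : ∃ j', j = j' + 1 := ⟨j - 1, by omega⟩
  rw [ex5Cut, if_neg (by omega), if_neg (by omega), hlen]
  norm_num

-- the memo only ever holds A's verdicts on prefixes
def MemoOk (s : List Int) (memo : PySem.Dict Int Bool) : Prop :=
  ∀ (j : Nat) (b : Bool), memo.get? (j : Int) = some b → b = ex5SequenceCut (s.take j)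

lemma cut_fuel_zero (s : List Int) : ex5Cut 0 s = true := by rw [ex5Cut]

lemma altCut_fuel_zero (s : List Int) (memo : PySem.Dict Int Bool) (j : Nat) :
    altCut 0 s memo j = (true, memo) := by rw [altCut]

lemma altCut_zero (f : Nat) (s : List Int) (memo : PySem.Dict Int Bool) :
    altCut (f + 1) s memo 0 = (true, memo) := by
  rw [altCut]; simp

lemma altCut_one (f : Nat) (s : List Int) (memo : PySem.Dict Int Bool) :
    altCut (f + 1) s memo 1 = (false, memo) := by
  rw [altCut]; simp

lemma altCut_memo (f : Nat) (s : List Int) (memo : PySem.Dict Int Bool) (j : Nat)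
    (h0 : j ≠ 0) (h1 : j ≠ 1) (b : Bool) (hm : memo.get? (j : Int) = some b) :
    altCut (f + 1) s memo j = (b, memo) := by
  rw [altCut]; simp [h0, h1, hm]

lemma altCut_miss (f : Nat) (s : List Int) (memo : PySem.Dict Int Bool) (j : Nat)
    (h0 : j ≠ 0) (h1 : j ≠ 1) (hm : memo.get? (j : Int) = none) :
    altCut (f + 1) s memo j =
      ((altLoop f s memo 0 0 ((j : Int) - 1)).1,
        PySem.Dict.insert (altLoop f s memo 0 0 ((j : Int) - 1)).2 (j : Int)
          (altLoop f s memo 0 0 ((j : Int) - 1)).1) := by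
  rw [altCut]; simp [h0, h1, hm]

lemma altLoop_neg (fuel : Nat) (s : List Int) (memo : PySem.Dict Int Bool)
    (p v i : Int) (h : i < 0) : altLoop fuel s memo p v i = (false, memo) := by
  rw [altLoop, dif_neg (by omega)]

lemma altLoop_unfold_zero (fuel : Nat) (s : List Int) (memo : PySem.Dict Int Bool)
    (p v : Int) :
    altLoop fuel s memo p v (0 : Int) =
      (if altIsPrime (v + s.getD 0 0 * 2 ^ p.toNat) then
        (if (altCut fuel s memo 0).1 then (true, (altCut fuel s memo 0).2)
         else (false, (altCut fuel s memo 0).2))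
       else (false, memo)) := by
  rw [altLoop, dif_pos (by norm_num)]
  simp only [Int.toNat_zero, zero_sub]
  rw [altLoop_neg fuel s _ _ _ _ (by norm_num), altLoop_neg fuel s _ _ _ _ (by norm_num)]

lemma altLoop_unfold_succ (fuel : Nat) (s : List Int) (memo : PySem.Dict Int Bool)
    (p v : Int) (i : Nat) :
    altLoop fuel s memo p v ((i + 1 : Nat) : Int) =
      (if altIsPrime (v + s.getD (i + 1) 0 * 2 ^ p.toNat) then
        (if (altCut fuel s memo (i + 1)).1 then (true, (altCut fuel s memo (i + 1)).2)
         else altLoop fuel s (altCut fuel s memo (i + 1)).2 (p + 1)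
                (v + s.getD (i + 1) 0 * 2 ^ p.toNat) (i : Int))
       else altLoop fuel s memo (p + 1) (v + s.getD (i + 1) 0 * 2 ^ p.toNat) (i : Int)) := by
  rw [altLoop, dif_pos (by positivity)]
  simp only [Int.toNat_natCast]
  rw [show ((i + 1 : Nat) : Int) - 1 = (i : Int) by push_cast; ring]

-- main invariant: with a correct memo, B's cut/loop compute A's verdicts and keep it correct
lemma alt_correct : ∀ (fuel : Nat) (s : List Int),
    (∀ (memo : PySem.Dict Int Bool) (j : Nat), MemoOk s memo → j ≤ fuel → j ≤ s.length →
      (altCut fuel s memo j).1 = ex5SequenceCut (s.take j)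
        ∧ MemoOk s (altCut fuel s memo j).2)
    ∧ (∀ (i : Nat) (p v : Int) (memo : PySem.Dict Int Bool), MemoOk s memo →
      i < s.length → i ≤ fuel →
      (altLoop fuel s memo p v (i : Int)).1 = ex5CutLoop fuel s p v (i : Int)
        ∧ MemoOk s (altLoop fuel s memo p v (i : Int)).2) := by
  intro fuel
  induction fuel with
  | zero =>
    intro s
    constructor
    · intro memo j hmemo hjf hjle
      rw [altCut_fuel_zero]
      have hj : j = 0 := by omega
      subst hj
      refine ⟨?_, hmemo⟩
      rw [List.take_zero, show ex5SequenceCut ([] : List Int) = ex5Cut 0 [] from rfl,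
        cut_nil]
    · intro i p v memo hmemo hi hif
      have hi0 : i = 0 := by omega
      subst hi0
      simp only [Nat.cast_zero]
      rw [altLoop_unfold_zero, loop_unfold_zero, altCut_fuel_zero, cut_fuel_zero,
        ← prime_eq]
      cases hp : altIsPrime (v + s.getD 0 0 * 2 ^ p.toNat) <;> simp [hmemo]
  | succ f ihf =>
    intro s
    have hPcut : ∀ (memo : PySem.Dict Int Bool) (j : Nat), MemoOk s memo →
        j ≤ f + 1 → j ≤ s.length →
        (altCut (f + 1) s memo j).1 = ex5SequenceCut (s.take j)
          ∧ MemoOk s (altCut (f + 1) s memo j).2 := by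
      intro memo j hmemo hjf hjle
      by_cases h0 : j = 0
      · subst h0
        rw [altCut_zero]
        refine ⟨?_, hmemo⟩
        rw [List.take_zero, show ex5SequenceCut ([] : List Int) = ex5Cut 0 [] from rfl,
          cut_nil]
      by_cases h1 : j = 1
      · subst h1
        rw [altCut_one]
        refine ⟨?_, hmemo⟩
        have hl : (s.take 1).length = 1 := by simp; omega
        rw [show ex5SequenceCut (s.take 1) = ex5Cut (s.take 1).length (s.take 1) from rfl,
          hl, ex5Cut, if_neg (by omega), if_pos hl]
      cases hm : PySem.Dict.get? memo (j : Int) with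
      | some b =>
        rw [altCut_memo f s memo j h0 h1 b hm]
        exact ⟨hmemo j b hm, hmemo⟩
      | none =>
        rw [altCut_miss f s memo j h0 h1 hm]
        have hj2 : 2 ≤ j := by omega
        have hcast : ((j : Nat) : Int) - 1 = ((j - 1 : Nat) : Int) := by omega
        obtain ⟨hl1, hl2⟩ := (ihf s).2 (j - 1) 0 0 memo hmemo (by omega) (by omega)
        rw [hcast]
        have hr : (altLoop f s memo 0 0 ((j - 1 : Nat) : Int)).1
            = ex5SequenceCut (s.take j) := by
          rw [hl1, loopA_prefix s j f hj2 hjle (by omega)]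
        refine ⟨hr, ?_⟩
        intro k b hget
        rw [PySem.Dict.get?_insert] at hget
        by_cases hkj : (k : Int) = (j : Int)
        · rw [if_pos hkj] at hget
          have : k = j := by exact_mod_cast hkj
          subst this
          cases hget
          exact hr
        · rw [if_neg hkj] at hget
          exact hl2 k b hget
    refine ⟨hPcut, ?_⟩
    intro i
    induction i with
    | zero =>
      intro p v memo hmemo hi hif
      simp only [Nat.cast_zero]
      obtain ⟨hc1, hc2⟩ := hPcut memo 0 hmemo (by omega) (by omega)
      have hc1' : (altCut (f + 1) s memo 0).1 = true := by
        rw [hc1, List.take_zero, show ex5SequenceCut ([] : List Int) = ex5Cut 0 []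
          from rfl, cut_nil]
      rw [altLoop_unfold_zero, loop_unfold_zero, ← prime_eq, hc1']
      have hcutnil : ex5Cut (f + 1) (s.take 0) = true := by
        rw [List.take_zero, cut_nil]
      rw [hcutnil]
      cases hp : altIsPrime (v + s.getD 0 0 * 2 ^ p.toNat) <;> simp [hc2, hmemo]
    | succ i' ihi =>
      intro p v memo hmemo hi hif
      obtain ⟨hc1, hc2⟩ := hPcut memo (i' + 1) hmemo (by omega) (by omega)
      have hcut : ex5Cut (f + 1) (s.take (i' + 1)) = (altCut (f + 1) s memo (i' + 1)).1 := by
        rw [cut_eq _ _ (by simp; omega), hc1]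
      rw [altLoop_unfold_succ, loop_unfold_succ, ← prime_eq, hcut]
      cases hp : altIsPrime (v + s.getD (i' + 1) 0 * 2 ^ p.toNat) <;>
        cases hR : (altCut (f + 1) s memo (i' + 1)).1
      · simp only [Bool.false_and, Bool.false_eq_true, if_false]
        exact ihi (p + 1) _ memo hmemo (by omega) (by omega)
      · simp only [Bool.false_and, Bool.false_eq_true, if_false]
        exact ihi (p + 1) _ memo hmemo (by omega) (by omega)
      · simp only [Bool.true_and, Bool.false_eq_true, if_false, if_true]
        exact ihi (p + 1) _ _ hc2 (by omega) (by omega)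
      · simp only [Bool.true_and, if_true]
        first
        | exact ⟨rfl, hc2⟩
        | exact hc2
        | simp [hc2]

-- ===== VERDICT (by name: the statement is the Claim_ definition above) =====
theorem ex5SequenceCut_spec : Claim_equal_ex5SequenceCut := by
  intro s _
  unfold Spec_ex5SequenceCut
  have hempty : MemoOk s PySem.Dict.empty := by
    intro j b hget
    rw [PySem.Dict.get?_empty] at hget
    cases hget
  have := ((alt_correct s.length s).1 PySem.Dict.empty s.length hempty (le_refl _)
    (le_refl _)).1
  rw [ex5SequenceCut_alt, this, List.take_length]
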